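-- pv_equiv track=rewrite | github.com/huynonstop/grinding-leetcode | leetcode/countOrders.py | count_dp
-- ===== SOURCE A (Python) =====
-- def count_dp(n):
--     dp = [[0] * (n + 1) for i in range(n + 1)]
--     MOD = 10 * 9 + 7
--
--     for unpicked in range(n+1):
--         for undelivered in range(unpicked, n+1):
--
--             if unpicked == undelivered == 0:
--                 dp[unpicked][undelivered] = 1
--                 continue
--
--             if unpicked > 0:
--                 dp[unpicked][undelivered] += unpicked * dp[unpicked -
--                                                            1][undelivered]
--             dp[unpicked][undelivered] %= MOD
--
--             if undelivered > unpicked: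
--                 dp[unpicked][undelivered] += (
--                     undelivered - unpicked) * dp[unpicked][undelivered - 1]
--             dp[unpicked][undelivered] %= MOD
--
--     return dp[-1][-1] % MOD
-- ===== SOURCE B (Python) =====
-- def count_dp(n):
--     # linear product recurrence; keeps A's literal modulus constant
--     MOD = 10 * 9 + 7
--     res = 1
--     for i in range(1, n + 1):
--         res = res * (2 * i - 1) * i % MOD
--     return res % MOD
-- ===== Notes on version B (the rewrite author's own statement) =====
-- stated objective: faster
-- what changed: Replaces the quadratic two-dimensional DP table with a single pass of the product recurrence (multiply the accumulator by the next odd factor and the next index each step, reducing by the same literal modulus constant A uses).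
import Mathlib
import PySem

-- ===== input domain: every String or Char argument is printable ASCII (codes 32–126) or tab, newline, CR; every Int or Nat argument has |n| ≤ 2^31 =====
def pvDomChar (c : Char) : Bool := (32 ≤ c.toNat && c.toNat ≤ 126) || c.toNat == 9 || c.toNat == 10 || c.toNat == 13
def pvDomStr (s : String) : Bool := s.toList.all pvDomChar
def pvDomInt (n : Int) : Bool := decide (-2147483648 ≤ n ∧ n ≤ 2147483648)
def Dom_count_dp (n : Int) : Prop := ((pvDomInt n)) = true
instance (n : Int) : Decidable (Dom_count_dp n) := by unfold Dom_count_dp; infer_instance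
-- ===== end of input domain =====

-- B replaces A's quadratic DP table with a one-pass product recurrence under A's literal modulus constant; objective: faster (measured).

-- ===== PORT A =====
def pvMOD : Int := 10 * 9 + 7

-- dp[i][j] read; indices produced by the loops are always in range, the default 0 is never reached under Pre_
def pvGetCell (dp : List (List Int)) (i j : Int) : Int :=
  (PySem.List.pyGet? ((PySem.List.pyGet? dp i).getD []) j).getD 0

-- dp[i][j] = v; loop indices are nonnegative and in range, where pySetD is exact
def pvSetCell (dp : List (List Int)) (i j : Int) (v : Int) : List (List Int) :=
  PySem.List.pySetD dp i (PySem.List.pySetD ((PySem.List.pyGet? dp i).getD []) j v)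

-- body of the inner 'for undelivered in range(unpicked, n+1)' loop; the chain of lets mirrors
-- the statements dp[u][d] += …; dp[u][d] %= MOD; … (each read is of a cell other than dp[u][d],
-- so collapsing the intermediate writes into one final set is exact)
def pvBody (unpicked : Int) (dp : List (List Int)) (undelivered : Int) : List (List Int) :=
  if unpicked = undelivered ∧ undelivered = 0 then
    pvSetCell dp unpicked undelivered 1
  else
    let v := pvGetCell dp unpicked undelivered
    let v := if unpicked > 0 then v + unpicked * pvGetCell dp (unpicked - 1) undelivered else v
    let v := PySem.Int.mod v pvMOD
    let v := if undelivered > unpicked then v + (undelivered - unpicked) * pvGetCell dp unpicked (undelivered - 1) else v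
    let v := PySem.Int.mod v pvMOD
    pvSetCell dp unpicked undelivered v

def pvOuter (n : Int) (dp : List (List Int)) (unpicked : Int) : List (List Int) :=
  (PySem.List.pyRange unpicked (n + 1) 1).foldl (pvBody unpicked) dp

def count_dp (n : Int) : Int :=
  let dp : List (List Int) :=
    (PySem.List.pyRange 0 (n + 1) 1).map (fun _ => List.replicate (n + 1).toNat (0 : Int))
  let dp := (PySem.List.pyRange 0 (n + 1) 1).foldl (pvOuter n) dp
  match PySem.List.pyGet? dp (-1) with
  | none => 0                    -- dp[-1] raises IndexError in Python on negative input; excluded by Pre_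
  | some row =>
    match PySem.List.pyGet? row (-1) with
    | none => 0
    | some v => PySem.Int.mod v pvMOD

-- ===== PORT B =====
def count_dp_alt (n : Int) : Int :=
  let res := (PySem.List.pyRange 1 (n + 1) 1).foldl
    (fun res i => PySem.Int.mod (res * (2 * i - 1) * i) pvMOD) 1
  PySem.Int.mod res pvMOD

-- ===== PRECONDITION & SPEC =====
-- Pre_ excludes exactly the negative inputs, where Python A indexes into the empty table and raises IndexError.
def Pre_count_dp (n : Int) : Prop := 0 ≤ n
instance (n : Int) : Decidable (Pre_count_dp n) := by unfold Pre_count_dp; infer_instance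
def pvWitness_count_dp : Int := 3

def Spec_count_dp (n : Int) (out : Int) : Prop := out = count_dp_alt n
instance (n : Int) (out : Int) : Decidable (Spec_count_dp n out) := by unfold Spec_count_dp; infer_instance

-- ===== CLAIM (what is proved, stated in full; the proofs are below) =====
def Claim_equal_count_dp : Prop := ∀ (n : Int), Dom_count_dp n → Pre_count_dp n → Spec_count_dp n (count_dp n)

-- ===== LEMMAS AND PROOFS =====

-- value stored in dp[u][d] (u ≤ d) by A, reduced mod 97 exactly as the loop body does
def pvF (u d : Nat) : Int :=
  if u = 0 ∧ d = 0 then 1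
  else
    (((if _h : 0 < u then 0 + (u : Int) * pvF (u - 1) d else 0) % 97) +
      (if _h : u < d then ((d : Int) - (u : Int)) * pvF u (d - 1) else 0)) % 97
termination_by u + d
decreasing_by all_goals omega

-- the same recurrence without the mod (exact integers)
def pvE (u d : Nat) : Int :=
  if u = 0 ∧ d = 0 then 1
  else
    (if _h : 0 < u then (u : Int) * pvE (u - 1) d else 0) +
      (if _h : u < d then ((d : Int) - (u : Int)) * pvE u (d - 1) else 0)
termination_by u + d
decreasing_by all_goals omega

-- B's accumulator after k iterations, and its exact (un-modded) counterpart
def pvQ : Nat → Int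
  | 0 => 1
  | k + 1 => pvQ k * (2 * ((k : Int) + 1) - 1) * ((k : Int) + 1) % 97

def pvP : Nat → Int
  | 0 => 1
  | k + 1 => pvP k * (2 * ((k : Int) + 1) - 1) * ((k : Int) + 1)

-- mod-97 arithmetic helpers
lemma pv_mod_mod (a : Int) : a % 97 % 97 = a % 97 := Int.emod_emod_of_dvd a dvd_rfl

lemma pv_mul_modr (a b : Int) : a * (b % 97) % 97 = a * b % 97 := by
  rw [Int.mul_emod, pv_mod_mod, ← Int.mul_emod]

lemma pv_add_modl (a b : Int) : (a % 97 + b) % 97 = (a + b) % 97 := by omega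

lemma pv_add_mulr (a b c : Int) : (a + b * (c % 97)) % 97 = (a + b * c) % 97 := by
  rw [Int.add_emod, pv_mul_modr, ← Int.add_emod]

lemma pvMOD_eq : pvMOD = 97 := by norm_num [pvMOD]

-- table abstraction: the (N+1)×(N+1) list-of-lists with entry g u d
def pvTbl (N : Nat) (g : Nat → Nat → Int) : List (List Int) :=
  (List.range (N + 1)).map (fun u => (List.range (N + 1)).map (g u))

-- contents of the table after the outer loop has finished rows < u and the inner loop of row u
-- has finished columns < e
def pvG (u e u' d' : Nat) : Int :=
  if u' < u ∧ u' ≤ d' ∨ u' = u ∧ u' ≤ d' ∧ d' < e then pvF u' d' else 0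

lemma map_range_set {α : Type} (m u : Nat) (f : Nat → α) (x : α) :
    ((List.range m).map f).set u x = (List.range m).map (fun i => if i = u then x else f i) := by
  apply List.ext_getElem (by simp)
  intro i h1 h2
  simp only [List.getElem_set, List.getElem_map, List.getElem_range]
  by_cases h : i = u
  · simp [h]
  · simp [h, Ne.symm h]

lemma pvTbl_congr (N : Nat) (g g' : Nat → Nat → Int)
    (h : ∀ u ≤ N, ∀ d ≤ N, g u d = g' u d) : pvTbl N g = pvTbl N g' := by
  unfold pvTbl
  apply List.map_congr_left
  intro u hu
  apply List.map_congr_left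
  intro d hd
  exact h u (by simpa using Nat.lt_succ_iff.mp (List.mem_range.mp hu))
         d (Nat.lt_succ_iff.mp (List.mem_range.mp hd))

lemma getCell_tbl (N : Nat) (g : Nat → Nat → Int) (u d : Nat) (hu : u ≤ N) (hd : d ≤ N) :
    pvGetCell (pvTbl N g) (u : Int) (d : Int) = g u d := by
  simp [pvGetCell, pvTbl, pysem, Nat.lt_succ_of_le hu, Nat.lt_succ_of_le hd]

lemma setCell_tbl (N : Nat) (g : Nat → Nat → Int) (u d : Nat) (v : Int) (hu : u ≤ N) (_hd : d ≤ N) :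
    pvSetCell (pvTbl N g) (u : Int) (d : Int) v
      = pvTbl N (fun u' d' => if u' = u ∧ d' = d then v else g u' d') := by
  unfold pvSetCell pvTbl
  simp only [pysem, List.getElem?_map, List.getElem?_range, Nat.lt_succ_of_le hu,
    Option.getD_some, Option.map_some]
  rw [map_range_set, map_range_set]
  apply List.map_congr_left
  intro i _
  by_cases h : i = u
  · subst h
    rw [if_pos rfl]
    apply List.map_congr_left
    intro d' _
    by_cases h' : d' = d <;> simp [h']
  · rw [if_neg h]
    apply List.map_congr_left
    intro d' _
    simp [h]

lemma body_step (N u e : Nat) (hu : u ≤ N) (hue : u ≤ e) (he : e ≤ N) :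
    pvBody (u : Int) (pvTbl N (pvG u e)) (e : Int) = pvTbl N (pvG u (e + 1)) := by
  rw [pvBody]
  by_cases h0 : u = 0 ∧ e = 0
  · obtain ⟨rfl, rfl⟩ := h0
    have hc0 : ((0 : Nat) : Int) = ((0 : Nat) : Int) ∧ ((0 : Nat) : Int) = 0 := by omega
    rw [if_pos hc0, setCell_tbl N _ 0 0 1 (by omega) (by omega)]
    apply pvTbl_congr
    intro u' _ d' _
    by_cases hc : u' = 0 ∧ d' = 0
    · obtain ⟨rfl, rfl⟩ := hc
      rw [if_pos ⟨rfl, rfl⟩, pvG, if_pos (by omega), pvF]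
      simp
    · rw [if_neg hc, pvG, pvG, if_neg (by omega), if_neg (by omega)]
  · have hcond : ¬((u : Int) = (e : Int) ∧ (e : Int) = 0) := by omega
    rw [if_neg hcond, getCell_tbl N _ u e hu he]
    have hv0 : pvG u e u e = 0 := by rw [pvG, if_neg (by omega)]
    rw [hv0]
    dsimp only
    have hmod : ∀ a : Int, PySem.Int.mod a pvMOD = a % 97 := by
      intro a; rw [pvMOD_eq, PySem.Int.mod_eq_emod_of_pos (by norm_num)]
    by_cases hu0 : 0 < u
    · have hgt : (u : Int) > 0 := by omega
      have hcast : (u : Int) - 1 = ((u - 1 : Nat) : Int) := by omega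
      rw [if_pos hgt, hcast, getCell_tbl N _ (u - 1) e (by omega) he]
      have hg1 : pvG u e (u - 1) e = pvF (u - 1) e := by rw [pvG, if_pos (by omega)]
      rw [hg1]
      by_cases hlt : u < e
      · have hgt2 : (e : Int) > (u : Int) := by omega
        have hcast2 : (e : Int) - 1 = ((e - 1 : Nat) : Int) := by omega
        rw [if_pos hgt2, hcast2, getCell_tbl N _ u (e - 1) hu (by omega)]
        have hg2 : pvG u e u (e - 1) = pvF u (e - 1) := by rw [pvG, if_pos (by omega)]
        rw [hg2, hmod, hmod, setCell_tbl N _ u e _ hu he]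
        apply pvTbl_congr
        intro u' _ d' _
        by_cases hc : u' = u ∧ d' = e
        · obtain ⟨rfl, rfl⟩ := hc
          rw [if_pos ⟨rfl, rfl⟩, pvG, if_pos (by omega)]
          conv_rhs => rw [pvF]
          rw [if_neg h0, dif_pos hu0, dif_pos hlt]
        · rw [if_neg hc, pvG, pvG]
          by_cases hm : u' < u ∧ u' ≤ d' ∨ u' = u ∧ u' ≤ d' ∧ d' < e
          · rw [if_pos hm, if_pos (by omega)]
          · rw [if_neg hm, if_neg (by omega)]
      · have hngt2 : ¬((e : Int) > (u : Int)) := by omega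
        rw [if_neg hngt2, hmod, hmod, setCell_tbl N _ u e _ hu he]
        apply pvTbl_congr
        intro u' _ d' _
        by_cases hc : u' = u ∧ d' = e
        · obtain ⟨rfl, rfl⟩ := hc
          rw [if_pos ⟨rfl, rfl⟩, pvG, if_pos (by omega)]
          conv_rhs => rw [pvF]
          rw [if_neg h0, dif_pos hu0, dif_neg hlt, add_zero]
        · rw [if_neg hc, pvG, pvG]
          by_cases hm : u' < u ∧ u' ≤ d' ∨ u' = u ∧ u' ≤ d' ∧ d' < e
          · rw [if_pos hm, if_pos (by omega)]
          · rw [if_neg hm, if_neg (by omega)]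
    · have hu' : u = 0 := by omega
      subst hu'
      have hlt : 0 < e := by omega
      have hngt : ¬(((0 : Nat) : Int) > 0) := by omega
      rw [if_neg hngt]
      have hgt2 : (e : Int) > ((0 : Nat) : Int) := by omega
      have hcast2 : (e : Int) - 1 = ((e - 1 : Nat) : Int) := by omega
      rw [if_pos hgt2, hcast2, getCell_tbl N _ 0 (e - 1) (by omega) (by omega)]
      have hg2 : pvG 0 e 0 (e - 1) = pvF 0 (e - 1) := by rw [pvG, if_pos (by omega)]
      rw [hg2, hmod, hmod, setCell_tbl N _ 0 e _ (by omega) he]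
      apply pvTbl_congr
      intro u' _ d' _
      by_cases hc : u' = 0 ∧ d' = e
      · obtain ⟨rfl, rfl⟩ := hc
        rw [if_pos ⟨rfl, rfl⟩, pvG, if_pos (by omega)]
        conv_rhs => rw [pvF]
        rw [if_neg h0, dif_neg hu0, dif_pos hlt]
      · rw [if_neg hc, pvG, pvG]
        by_cases hm : u' < 0 ∧ u' ≤ d' ∨ u' = 0 ∧ u' ≤ d' ∧ d' < e
        · rw [if_pos hm, if_pos (by omega)]
        · rw [if_neg hm, if_neg (by omega)]

lemma G_shift (N u : Nat) :
    pvTbl N (pvG u (N + 1)) = pvTbl N (pvG (u + 1) (u + 1)) := by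
  apply pvTbl_congr
  intro u' hu' d' hd'
  unfold pvG
  by_cases h : u' < u ∧ u' ≤ d' ∨ u' = u ∧ u' ≤ d' ∧ d' < N + 1 <;>
    [rw [if_pos h, if_pos (by omega)]; rw [if_neg h, if_neg (by omega)]]

lemma inner_fold (N u : Nat) (huN : u ≤ N) :
    ∀ k e, u ≤ e → e + k = N + 1 →
      (PySem.List.pyRange (e : Int) ((N : Int) + 1) 1).foldl (pvBody (u : Int)) (pvTbl N (pvG u e))
        = pvTbl N (pvG u (N + 1)) := by
  intro k
  induction k with
  | zero =>
    intro e hue heq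
    have he : e = N + 1 := by omega
    subst he
    rw [PySem.List.pyRange_one_eq_nil (by push_cast; omega)]
    rfl
  | succ k ih =>
    intro e hue heq
    have he : e ≤ N := by omega
    rw [PySem.List.pyRange_one_cons (by omega), List.foldl_cons,
      body_step N u e huN hue he]
    have : ((e : Int) + 1) = ((e + 1 : Nat) : Int) := by push_cast; ring
    rw [this]
    exact ih (e + 1) (by omega) (by omega)

lemma outer_fold (N : Nat) :
    ∀ k u, u + k = N + 1 →
      (PySem.List.pyRange (u : Int) ((N : Int) + 1) 1).foldl (pvOuter (N : Int)) (pvTbl N (pvG u u))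
        = pvTbl N (pvG (N + 1) (N + 1)) := by
  intro k
  induction k with
  | zero =>
    intro u heq
    have hu : u = N + 1 := by omega
    subst hu
    rw [PySem.List.pyRange_one_eq_nil (by push_cast; omega)]
    rfl
  | succ k ih =>
    intro u heq
    have hu : u ≤ N := by omega
    rw [PySem.List.pyRange_one_cons (by omega), List.foldl_cons]
    have h1 : pvOuter (N : Int) (pvTbl N (pvG u u)) (u : Int) = pvTbl N (pvG (u + 1) (u + 1)) := by
      unfold pvOuter
      rw [inner_fold N u hu (N + 1 - u) u le_rfl (by omega), G_shift]
    rw [h1]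
    have : ((u : Int) + 1) = ((u + 1 : Nat) : Int) := by push_cast; ring
    rw [this]
    exact ih (u + 1) (by omega)

-- characterisations of the two ports -------------------------------------------------

lemma dp0_eq (N : Nat) :
    (PySem.List.pyRange 0 ((N : Int) + 1) 1).map
        (fun _ => List.replicate (((N : Int) + 1)).toNat (0 : Int))
      = pvTbl N (pvG 0 0) := by
  have h1 : ((N : Int) + 1) = ((N + 1 : Nat) : Int) := by omega
  rw [h1, PySem.List.pyRange_zero_nat, pvTbl, List.map_map]
  apply List.map_congr_left
  intro u _
  have h2 : (((N + 1 : Nat) : Int)).toNat = N + 1 := by omega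
  rw [Function.comp_apply, h2]
  apply List.ext_getElem (by simp)
  intro i h3 h4
  simp [pvG]

lemma tbl_get (N : Nat) (g : Nat → Nat → Int) :
    (match PySem.List.pyGet? (pvTbl N g) (-1) with
      | none => (0 : Int)
      | some row =>
        match PySem.List.pyGet? row (-1) with
        | none => (0 : Int)
        | some v => PySem.Int.mod v pvMOD) = PySem.Int.mod (g N N) pvMOD := by
  have hlen : (pvTbl N g).length = N + 1 := by simp [pvTbl]
  rw [PySem.List.pyGet?_neg_ofNat _ 1 (by omega) (by omega), hlen]
  have hrow : (pvTbl N g)[N + 1 - 1]? = some ((List.range (N + 1)).map (g N)) := by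
    simp [pvTbl]
  rw [hrow]
  dsimp only
  have hlen2 : ((List.range (N + 1)).map (g N)).length = N + 1 := by simp
  rw [PySem.List.pyGet?_neg_ofNat _ 1 (by omega) (by simp), hlen2]
  have hent : ((List.range (N + 1)).map (g N))[N + 1 - 1]? = some (g N N) := by simp
  rw [hent]

lemma count_dp_eval (N : Nat) : count_dp (N : Int) = pvF N N % 97 := by
  rw [count_dp]
  rw [dp0_eq N]
  have hout : (PySem.List.pyRange 0 ((N : Int) + 1) 1).foldl (pvOuter (N : Int))
      (pvTbl N (pvG 0 0)) = pvTbl N (pvG (N + 1) (N + 1)) := by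
    have h := outer_fold N (N + 1) 0 (by omega)
    simpa using h
  rw [hout, tbl_get]
  have hG : pvG (N + 1) (N + 1) N N = pvF N N := by rw [pvG, if_pos (by omega)]
  rw [hG, pvMOD_eq, PySem.Int.mod_eq_emod_of_pos (by norm_num)]

lemma count_dp_alt_eval (N : Nat) : count_dp_alt (N : Int) = pvQ N % 97 := by
  rw [count_dp_alt]
  have hfold : ∀ M : Nat,
      (PySem.List.pyRange 1 ((M : Int) + 1) 1).foldl
        (fun res i => PySem.Int.mod (res * (2 * i - 1) * i) pvMOD) 1 = pvQ M := by
    intro M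
    induction M with
    | zero => rw [PySem.List.pyRange_one_eq_nil (by omega)]; rfl
    | succ M ih =>
      have h1 : ((M + 1 : Nat) : Int) + 1 = ((M : Int) + 1) + 1 := by omega
      rw [h1, PySem.List.pyRange_one_succ_right (by omega), List.foldl_append, ih]
      simp only [List.foldl_cons, List.foldl_nil]
      rw [pvMOD_eq, PySem.Int.mod_eq_emod_of_pos (by norm_num), pvQ]
  rw [hfold N, pvMOD_eq, PySem.Int.mod_eq_emod_of_pos (by norm_num)]

-- number theory ------------------------------------------------------------------------

lemma pvF_eq (u d : Nat) (h : u ≤ d) : pvF u d = pvE u d % 97 := by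
  rw [pvF]
  conv_rhs => rw [pvE]
  by_cases h0 : u = 0 ∧ d = 0
  · rw [if_pos h0, if_pos h0]; norm_num
  · rw [if_neg h0, if_neg h0]
    by_cases hu0 : 0 < u
    · rw [dif_pos hu0, dif_pos hu0, pvF_eq (u - 1) d (by omega)]
      by_cases hlt : u < d
      · rw [dif_pos hlt, dif_pos hlt, pvF_eq u (d - 1) (by omega), zero_add,
          pv_mul_modr, pv_add_mulr, pv_add_modl]
      · rw [dif_neg hlt, dif_neg hlt, add_zero, add_zero, zero_add, pv_mul_modr, pv_mod_mod]
    · rw [dif_neg hu0, dif_neg hu0]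
      have hlt : u < d := by omega
      rw [dif_pos hlt, dif_pos hlt, pvF_eq u (d - 1) (by omega), pv_add_mulr]
      norm_num
termination_by u + d
decreasing_by all_goals omega

lemma pvQ_eq (k : Nat) : pvQ k = pvP k % 97 := by
  induction k with
  | zero => simp [pvQ, pvP]
  | succ k ih =>
    rw [pvQ, pvP, ih, mul_assoc, mul_assoc, Int.mul_emod, pv_mod_mod, ← Int.mul_emod]

lemma pvE_mul (u d : Nat) (h : u ≤ d) : pvE u d * 2 ^ u = ((d + u).factorial : Int) := by
  rw [pvE]
  by_cases h0 : u = 0 ∧ d = 0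
  · obtain ⟨rfl, rfl⟩ := h0
    simp [Nat.factorial]
  · rw [if_neg h0]
    have hfac : ((d + u).factorial : Int) = ((d : Int) + u) * ((d + u - 1).factorial : Int) := by
      rw [show d + u = (d + u - 1) + 1 from by omega, Nat.factorial_succ, Nat.cast_mul,
        show (((d + u - 1) + 1 : Nat) : Int) = (d : Int) + u from by omega,
        show d + u - 1 + 1 - 1 = d + u - 1 from by omega]
    by_cases hu0 : 0 < u
    · rw [dif_pos hu0]
      have ih1 : pvE (u - 1) d * 2 ^ (u - 1) = ((d + u - 1).factorial : Int) := by
        have := pvE_mul (u - 1) d (by omega)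
        rwa [show d + (u - 1) = d + u - 1 from by omega] at this
      have hpow : (2 : Int) ^ u = 2 * 2 ^ (u - 1) := by
        rw [← pow_succ']
        congr 1
        omega
      by_cases hlt : u < d
      · rw [dif_pos hlt]
        have ih2 : pvE u (d - 1) * (2 * 2 ^ (u - 1)) = ((d + u - 1).factorial : Int) := by
          have := pvE_mul u (d - 1) (by omega)
          rwa [show d - 1 + u = d + u - 1 from by omega, hpow] at this
        rw [hpow, hfac]
        linear_combination (2 * (u : Int)) * ih1 + ((d : Int) - u) * ih2
      · rw [dif_neg hlt, add_zero]
        obtain rfl : d = u := by omega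
        rw [hpow, hfac]
        linear_combination (2 * (d : Int)) * ih1
    · rw [dif_neg hu0]
      have hu' : u = 0 := by omega
      subst hu'
      have hlt : 0 < d := by omega
      rw [dif_pos hlt]
      have ih2 : pvE 0 (d - 1) * 2 ^ (0 : Nat) = ((d + 0 - 1).factorial : Int) := by
        have := pvE_mul 0 (d - 1) (by omega)
        rwa [show d - 1 + 0 = d + 0 - 1 from by omega] at this
      rw [hfac]
      push_cast at ih2 ⊢
      linear_combination (d : Int) * ih2
termination_by u + d
decreasing_by all_goals omega

lemma pvP_mul (k : Nat) : pvP k * 2 ^ k = ((2 * k).factorial : Int) := by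
  induction k with
  | zero => simp [pvP]
  | succ k ih =>
    rw [pvP]
    have h2 : 2 * (k + 1) = (2 * k + 1) + 1 := by ring
    rw [h2, Nat.factorial_succ, Nat.factorial_succ]
    push_cast [pow_succ]
    linear_combination (2 * (k : Int) + 2) * (2 * (k : Int) + 1) * ih

lemma pvE_diag (N : Nat) : pvE N N = pvP N := by
  have h2 : (2 : Int) ^ N ≠ 0 := by positivity
  have := pvE_mul N N le_rfl
  have h5 := pvP_mul N
  apply mul_right_cancel₀ h2
  rw [this, h5]
  norm_num [two_mul]

-- ===== VERDICT (by name: the statement is the Claim_ definition above) =====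
theorem count_dp_spec : Claim_equal_count_dp := by
  intro n _hdom hpre
  unfold Spec_count_dp
  obtain ⟨N, rfl⟩ : ∃ N : Nat, n = (N : Int) := ⟨n.toNat, (Int.toNat_of_nonneg hpre).symm⟩
  rw [count_dp_eval, count_dp_alt_eval, pvF_eq N N le_rfl, pvE_diag, pvQ_eq, pv_mod_mod]
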